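-- pv_equiv track=rewrite | github.com/UCdasec/MitigateFileInjectionAttacks | rnn/text_post_process/filter.py | pair_groups
-- ===== SOURCE A (Python) =====
-- def pair_groups(groups):
--     '''
--     Given a group of keyword_sets, pair every two of them to form a new group
--     and return a new group of pairs
--     '''
--     g_size = len(groups)
--
--     group_pairs = []
--     pair = []
--
--     for i, group in enumerate(groups):
--        # print i, group
--        for g in group:
--           pair.append(g)
--        if (i%2 == 1) or (i == g_size - 1):
--           group_pairs.append(pair)
--           pair = []
--
--     #for p in group_pairs:
--     #   print p
--
--     return group_pairs
-- ===== SOURCE B (Python) =====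
-- def pair_groups(groups):
--     '''
--     Given a group of keyword_sets, pair every two of them to form a new group
--     and return a new group of pairs
--     '''
--     if not groups:
--         return []
--     if len(groups) == 1:
--         return [list(groups[0])]
--     return [groups[0] + groups[1]] + pair_groups(groups[2:])
-- ===== Notes on version B (the rewrite author's own statement) =====
-- stated objective: simpler
-- what changed: Replaces the stateful enumerate loop with a modulo flag and last-index flush by a direct structural recursion that consumes the list two groups at a time, concatenating each pair.
import Mathlib
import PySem

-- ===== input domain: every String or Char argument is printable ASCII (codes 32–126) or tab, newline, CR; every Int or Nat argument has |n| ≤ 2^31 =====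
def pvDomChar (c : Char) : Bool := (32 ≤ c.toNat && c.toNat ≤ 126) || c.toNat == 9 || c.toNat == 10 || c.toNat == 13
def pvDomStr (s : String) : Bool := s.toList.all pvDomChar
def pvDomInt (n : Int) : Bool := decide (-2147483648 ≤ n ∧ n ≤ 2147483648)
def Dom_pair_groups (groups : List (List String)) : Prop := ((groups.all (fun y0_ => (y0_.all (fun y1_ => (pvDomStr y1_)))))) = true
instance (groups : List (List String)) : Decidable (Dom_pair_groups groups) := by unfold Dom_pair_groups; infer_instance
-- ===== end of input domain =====

-- B replaces A's stateful enumerate loop (modulo flag + last-index flush) by a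
-- structural recursion consuming two groups at a time; same cost, simpler.

-- ===== PORT A =====
def pair_groups (groups : List (List String)) : List (List String) :=
  let g_size : Int := groups.length
  let st :=
    (PySem.List.enumerate groups 0).foldl
      (fun (st : List (List String) × List String) ig =>
        let pair := ig.2.foldl (fun p g => p ++ [g]) st.2
        if ig.1 % 2 == 1 || ig.1 == g_size - 1 then (st.1 ++ [pair], [])
        else (st.1, pair))
      ([], [])
  st.1

-- ===== PORT B =====
def pair_groups_alt : List (List String) → List (List String)
  | [] => []
  | [g] => [g]
  | g1 :: g2 :: rest => (g1 ++ g2) :: pair_groups_alt rest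

-- ===== PRECONDITION & SPEC =====
def Spec_pair_groups (groups : List (List String)) (out : List (List String)) : Prop := out = pair_groups_alt groups
instance (groups : List (List String)) (out : List (List String)) : Decidable (Spec_pair_groups groups out) := by unfold Spec_pair_groups; infer_instance

-- ===== CLAIM (what is proved, stated in full; the proofs are below) =====
def Claim_equal_pair_groups : Prop := ∀ (groups : List (List String)), Dom_pair_groups groups → Spec_pair_groups groups (pair_groups groups)

-- ===== LEMMAS AND PROOFS =====

lemma foldl_push (l : List String) (p : List String) :
    l.foldl (fun p g => p ++ [g]) p = p ++ l := by
  induction l generalizing p with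
  | nil => simp
  | cons x xs ih => rw [List.foldl_cons, ih]; simp

def loopBody (n : Int) (st : List (List String) × List String)
    (ig : Int × List String) : List (List String) × List String :=
  if ig.1 % 2 == 1 || ig.1 == n - 1 then (st.1 ++ [st.2 ++ ig.2], [])
  else (st.1, st.2 ++ ig.2)

lemma body_eq (n : Int) :
    (fun (st : List (List String) × List String) (ig : Int × List String) =>
      let pair := ig.2.foldl (fun p g => p ++ [g]) st.2
      if ig.1 % 2 == 1 || ig.1 == n - 1 then (st.1 ++ [pair], [])
      else (st.1, pair)) = loopBody n := by
  funext st ig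
  simp only [loopBody, foldl_push]

lemma loop_key (gs : List (List String)) (n k : Int) (acc : List (List String))
    (hk : 0 ≤ k) (he : k % 2 = 0) (hn : n = k + gs.length) :
    ((PySem.List.enumerate gs k).foldl (loopBody n) (acc, [])).1
      = acc ++ pair_groups_alt gs := by
  induction gs using pair_groups_alt.induct generalizing k acc with
  | case1 => simp [PySem.List.enumerate, pair_groups_alt]
  | case2 g =>
      have h2 : (k == n - 1) = true := by
        simp [hn]
      rw [PySem.List.enumerate_cons, PySem.List.enumerate_nil,
        List.foldl_cons, List.foldl_nil]
      simp only [loopBody, h2, Bool.or_true, if_true, pair_groups_alt,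
        List.nil_append]
  | case3 g1 g2 rest ih =>
      have h1 : (k % 2 == 1) = false := by simp; omega
      have h2 : (k == n - 1) = false := by
        simp only [hn]; simp [List.length]; omega
      have h3 : ((k + 1) % 2 == 1) = true := by simp; omega
      rw [PySem.List.enumerate_cons, PySem.List.enumerate_cons,
        List.foldl_cons, List.foldl_cons]
      simp only [loopBody, h1, h2, h3, Bool.or_self, Bool.true_or,
        Bool.false_eq_true, if_false, if_true, List.nil_append]
      rw [ih (k + 1 + 1) (acc ++ [g1 ++ g2]) (by omega) (by omega)
        (by simp only [hn, List.length]; push_cast; ring)]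
      simp [pair_groups_alt]

-- ===== VERDICT (by name: the statement is the Claim_ definition above) =====
theorem pair_groups_spec : Claim_equal_pair_groups := by
  intro groups _
  unfold Spec_pair_groups pair_groups
  simp only [body_eq]
  exact (loop_key groups groups.length 0 [] le_rfl rfl (by simp))
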